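-- pv_equiv track=rewrite | github.com/Vfold-RNA/DeepCryoRNA | src/predict_structures_from_atoms.py | remove_short_chains_from_native_seq
-- ===== SOURCE A (Python) =====
-- import copy
--
-- def remove_short_chains_from_native_seq(list_native_seq_raw):
--     list_native_seq = copy.deepcopy(list_native_seq_raw)
--     to_remove_idx = []
--     dict_right_chain_order = {}
--     count = 0
--     for i, seq in enumerate(list_native_seq):
--         if len(seq) < 6:
--             to_remove_idx.append(i)
--             count += 1
--         else:
--             dict_right_chain_order[i-count] = i
--
--     for idx in sorted(to_remove_idx,reverse=True):
--         list_native_seq.pop(idx)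
--
--     return list_native_seq, dict_right_chain_order
-- ===== SOURCE B (Python) =====
-- import copy
--
-- def remove_short_chains_from_native_seq(list_native_seq_raw):
--     # single forward pass: keep chains of length >= 6 and record kept-index -> original-index
--     result = []
--     dict_right_chain_order = {}
--     for i, seq in enumerate(list_native_seq_raw):
--         if len(seq) >= 6:
--             dict_right_chain_order[len(result)] = i
--             result.append(copy.deepcopy(seq))
--     return result, dict_right_chain_order
-- ===== Notes on version B (the rewrite author's own statement) =====
-- stated objective: simpler
-- what changed: One forward pass that appends kept chains and records kept-index->original-index directly, eliminating A's to_remove_idx list, count variable, sort, and the second reverse-pop pass.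
import Mathlib
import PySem

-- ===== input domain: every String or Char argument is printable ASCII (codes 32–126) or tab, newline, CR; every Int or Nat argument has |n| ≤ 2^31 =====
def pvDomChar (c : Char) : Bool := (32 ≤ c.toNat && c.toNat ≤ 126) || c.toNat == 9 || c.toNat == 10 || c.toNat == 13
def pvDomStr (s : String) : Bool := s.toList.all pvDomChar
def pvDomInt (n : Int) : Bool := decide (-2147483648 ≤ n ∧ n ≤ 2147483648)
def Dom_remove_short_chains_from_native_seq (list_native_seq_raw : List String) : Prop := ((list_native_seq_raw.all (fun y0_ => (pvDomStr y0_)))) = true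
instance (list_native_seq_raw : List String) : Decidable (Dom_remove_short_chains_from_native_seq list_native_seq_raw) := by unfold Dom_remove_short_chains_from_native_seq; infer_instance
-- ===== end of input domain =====

-- B is a simpler single forward pass building the kept list and the index map directly,
-- replacing A's to_remove_idx/count bookkeeping, the sort and the reverse-pop second pass.
-- (Strings are immutable; A's deepcopy has no observable effect on the return value.)

-- ===== PORT A =====
-- first-pass loop body of A: state (to_remove_idx, dict_right_chain_order, count)
def pvStepA (acc : List Int × PySem.Dict Int Int × Int) (p : Int × String) :
    List Int × PySem.Dict Int Int × Int :=
  if PySem.Str.len p.2 < 6 then (acc.1 ++ [p.1], acc.2.1, acc.2.2 + 1)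
  else (acc.1, acc.2.1.insert (p.1 - acc.2.2) p.1, acc.2.2)

-- second-pass body: list_native_seq.pop(idx); the index is always in range here,
-- so the `none` (IndexError) branch is never taken
def pvPop (l : List String) (idx : Int) : List String :=
  match PySem.List.pop? l idx with
  | some r => r.2
  | none => l

def remove_short_chains_from_native_seq (list_native_seq_raw : List String) :
    List String × (List (Int × Int)) :=
  let st := (PySem.List.enumerate list_native_seq_raw).foldl pvStepA
    ([], PySem.Dict.empty, 0)
  let lst := (PySem.List.sorted st.1 (fun x => x) true).foldl pvPop list_native_seq_raw
  (lst, st.2.1.items)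

-- ===== PORT B =====
-- single-pass loop body of B: state (result, dict_right_chain_order)
def pvStepB (acc : List String × List (Int × Int)) (p : Int × String) :
    List String × List (Int × Int) :=
  if 6 ≤ PySem.Str.len p.2 then
    (acc.1 ++ [p.2], acc.2 ++ [((acc.1.length : Int), p.1)])
  else acc

def remove_short_chains_from_native_seq_alt (list_native_seq_raw : List String) :
    List String × (List (Int × Int)) :=
  (PySem.List.enumerate list_native_seq_raw).foldl pvStepB ([], [])

-- ===== PRECONDITION & SPEC =====
def Spec_remove_short_chains_from_native_seq (list_native_seq_raw : List String) (out : List String × (List (Int × Int))) : Prop := out = remove_short_chains_from_native_seq_alt list_native_seq_raw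
instance (list_native_seq_raw : List String) (out : List String × (List (Int × Int))) : Decidable (Spec_remove_short_chains_from_native_seq list_native_seq_raw out) := by unfold Spec_remove_short_chains_from_native_seq; infer_instance

-- ===== CLAIM (what is proved, stated in full; the proofs are below) =====
def Claim_equal_remove_short_chains_from_native_seq : Prop := ∀ (list_native_seq_raw : List String), Dom_remove_short_chains_from_native_seq list_native_seq_raw → Spec_remove_short_chains_from_native_seq list_native_seq_raw (remove_short_chains_from_native_seq list_native_seq_raw)

-- ===== LEMMAS AND PROOFS =====

-- closed forms shared by both sides
def shortIdx : List String → Int → List Int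
  | [], _ => []
  | y :: t, s => if PySem.Str.len y < 6 then s :: shortIdx t (s + 1) else shortIdx t (s + 1)

def keepList : List String → List String
  | [] => []
  | y :: t => if PySem.Str.len y < 6 then keepList t else y :: keepList t

def keepPairs : List String → Int → Int → List (Int × Int)
  | [], _, _ => []
  | y :: t, s, k =>
    if PySem.Str.len y < 6 then keepPairs t (s + 1) k else (k, s) :: keepPairs t (s + 1) (k + 1)

def numShort : List String → Int
  | [] => 0
  | y :: t => (if PySem.Str.len y < 6 then 1 else 0) + numShort t

-- B's fold in closed form
theorem foldB_spec (xs : List String) : ∀ (s : Int) (res : List String) (dl : List (Int × Int)),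
    (PySem.List.enumerate xs s).foldl pvStepB (res, dl) =
      (res ++ keepList xs, dl ++ keepPairs xs s (res.length : Int)) := by
  induction xs with
  | nil => intro s res dl; simp [PySem.List.enumerate_nil, keepList, keepPairs]
  | cons y t ih =>
    intro s res dl
    rw [PySem.List.enumerate_cons, List.foldl_cons]
    by_cases h : PySem.Str.len y < 6
    · have hstep : pvStepB (res, dl) (s, y) = (res, dl) := by
        simp only [pvStepB, if_neg (by omega : ¬ (6 : Int) ≤ PySem.Str.len y)]
      rw [hstep, ih]
      simp only [keepList, keepPairs]
      rw [if_pos h, if_pos h]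
    · have hstep : pvStepB (res, dl) (s, y) = (res ++ [y], dl ++ [((res.length : Int), s)]) := by
        simp only [pvStepB, if_pos (by omega : (6 : Int) ≤ PySem.Str.len y)]
      rw [hstep, ih]
      simp only [keepList, keepPairs]
      rw [if_neg h, if_neg h]
      simp [List.append_assoc]

-- A's first pass in closed form (keys already present are all below s - c, so inserts append)
theorem foldA_spec (xs : List String) : ∀ (s c : Int) (rm : List Int) (d : PySem.Dict Int Int),
    (∀ p ∈ d.items, p.1 < s - c) →
    (PySem.List.enumerate xs s).foldl pvStepA (rm, d, c) =
      ((rm ++ shortIdx xs s,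
        ((PySem.List.enumerate xs s).foldl pvStepA (rm, d, c)).2.1, c + numShort xs)) ∧
    ((PySem.List.enumerate xs s).foldl pvStepA (rm, d, c)).2.1.items =
      d.items ++ keepPairs xs s (s - c) := by
  induction xs with
  | nil => intro s c rm d _; simp [PySem.List.enumerate_nil, shortIdx, keepPairs, numShort]
  | cons y t ih =>
    intro s c rm d hk
    rw [PySem.List.enumerate_cons, List.foldl_cons]
    by_cases h : PySem.Str.len y < 6
    · have hstep : pvStepA (rm, d, c) (s, y) = (rm ++ [s], d, c + 1) := by
        simp only [pvStepA, if_pos h]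
      rw [hstep]
      have hk' : ∀ p ∈ d.items, p.1 < (s + 1) - (c + 1) := by intro p hp; have := hk p hp; omega
      obtain ⟨h1, h2⟩ := ih (s + 1) (c + 1) (rm ++ [s]) d hk'
      refine ⟨?_, ?_⟩
      · rw [h1]
        simp only [shortIdx, if_pos h, numShort, List.append_assoc, List.singleton_append]
        refine congrArg _ (congrArg _ ?_)
        omega
      · rw [h2]
        simp only [keepPairs, if_pos h]
        have : (s + 1) - (c + 1) = s - c := by omega
        rw [this]
    · have hstep : pvStepA (rm, d, c) (s, y) = (rm, d.insert (s - c) s, c) := by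
        simp only [pvStepA, if_neg h]
      rw [hstep]
      have hnc : d.contains (s - c) = false := by
        by_contra hc
        have hmem : (s - c) ∈ d.keys := by
          rw [← PySem.Dict.contains_iff_mem_keys]
          simpa using hc
        simp only [PySem.Dict.keys, List.mem_map] at hmem
        obtain ⟨p, hp, hpe⟩ := hmem
        have := hk p hp
        omega
      have hk' : ∀ p ∈ (d.insert (s - c) s).items, p.1 < (s + 1) - c := by
        intro p hp
        rw [PySem.Dict.mem_items_insert] at hp
        rcases hp with hp | hp
        · subst hp; omega
        · have := hk p hp.1; omega
      obtain ⟨h1, h2⟩ := ih (s + 1) c rm (d.insert (s - c) s) hk'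
      refine ⟨?_, ?_⟩
      · rw [h1]
        simp only [shortIdx, if_neg h, numShort]
        refine congrArg _ (congrArg _ ?_)
        omega
      · rw [h2, PySem.Dict.items_insert_of_not_contains _ _ hnc]
        simp only [keepPairs, if_neg h, List.append_assoc, List.singleton_append]
        have : (s + 1) - c = (s - c) + 1 := by omega
        rw [this]

-- every index produced by shortIdx is ≥ the start
theorem shortIdx_ge (xs : List String) : ∀ (s : Int), ∀ x ∈ shortIdx xs s, s ≤ x := by
  induction xs with
  | nil => intro s x hx; simp [shortIdx] at hx
  | cons y t ih =>
    intro s x hx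
    simp only [shortIdx] at hx
    split at hx
    · rcases List.mem_cons.mp hx with hx | hx
      · omega
      · have := ih (s + 1) x hx; omega
    · have := ih (s + 1) x hx; omega

theorem shortIdx_pairwise (xs : List String) : ∀ (s : Int), (shortIdx xs s).Pairwise (· < ·) := by
  induction xs with
  | nil => intro s; simp [shortIdx]
  | cons y t ih =>
    intro s
    simp only [shortIdx]
    split
    · exact List.Pairwise.cons (fun x hx => by have := shortIdx_ge t (s + 1) x hx; omega) (ih (s + 1))
    · exact ih (s + 1)

-- popping the short indices back-to-front from pre ++ ys leaves pre ++ keepList ys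
theorem popAll (ys : List String) : ∀ (pre : List String),
    ((shortIdx ys (pre.length : Int)).reverse).foldl pvPop (pre ++ ys) = pre ++ keepList ys := by
  induction ys with
  | nil => intro pre; simp [shortIdx, keepList]
  | cons y t ih =>
    intro pre
    have hlen : ((pre ++ [y]).length : Int) = (pre.length : Int) + 1 := by
      simp
    by_cases h : PySem.Str.len y < 6
    · simp only [shortIdx, if_pos h, List.reverse_cons, List.foldl_append]
      have hstep : pre ++ y :: t = (pre ++ [y]) ++ t := by simp
      rw [hstep, ← hlen, ih (pre ++ [y])]
      simp only [List.foldl_cons, List.foldl_nil]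
      have hrange : pre.length < ((pre ++ [y]) ++ keepList t).length := by
        simp
      have hpop : PySem.List.pop? ((pre ++ [y]) ++ keepList t) ((pre.length : Int)) =
          some (((pre ++ [y]) ++ keepList t)[pre.length]'hrange,
                ((pre ++ [y]) ++ keepList t).eraseIdx pre.length) :=
        PySem.List.pop?_natCast _ _ hrange
      simp only [pvPop, hpop]
      rw [List.append_assoc, List.eraseIdx_append_of_length_le (le_refl pre.length)]
      simp only [Nat.sub_self, List.singleton_append, List.eraseIdx_cons_zero, keepList]
      rw [if_pos h]
    · simp only [shortIdx, if_neg h]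
      have hstep : pre ++ y :: t = (pre ++ [y]) ++ t := by simp
      rw [hstep, ← hlen, ih (pre ++ [y])]
      simp only [keepList]
      rw [if_neg h]
      simp

-- ===== VERDICT (by name: the statement is the Claim_ definition above) =====
theorem remove_short_chains_from_native_seq_spec : Claim_equal_remove_short_chains_from_native_seq := by
  intro xs _
  unfold Spec_remove_short_chains_from_native_seq
  unfold remove_short_chains_from_native_seq remove_short_chains_from_native_seq_alt
  have hA := foldA_spec xs 0 0 [] PySem.Dict.empty (by intro p hp; simp [PySem.Dict.empty] at hp)
  have hB := foldB_spec xs 0 [] []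
  simp only [List.nil_append, List.length_nil, Nat.cast_zero] at hA hB
  rw [hB]
  obtain ⟨h1, h2⟩ := hA
  rw [h1]
  simp only []
  have hsorted : PySem.List.sorted (shortIdx xs 0) (fun x => x) true = (shortIdx xs 0).reverse := by
    apply PySem.List.sorted_rev_eq_of_perm_of_pairwise_gt
    · exact (shortIdx xs 0).reverse_perm
    · rw [List.pairwise_reverse]
      exact shortIdx_pairwise xs 0
  rw [hsorted]
  have hpop := popAll xs []
  simp only [List.nil_append, List.length_nil, Nat.cast_zero] at hpop
  rw [hpop]
  rw [h2]
  simp [PySem.Dict.empty]
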